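-- pv_equiv track=rewrite | github.com/civickyle/final_actions | app.py | classify_paper_type
-- ===== SOURCE A (Python) =====
-- def classify_paper_type(sponsors, committee_names, councilmember_names):
--     """Classify legislation as Committee Paper or Personal Paper."""
--     if not sponsors:
--         return None
--
--     has_committee = any(s in committee_names for s in sponsors)
--     has_councilmember = any(s in councilmember_names for s in sponsors)
--
--     if has_committee and not has_councilmember:
--         return "Committee Paper"
--     elif has_councilmember and not has_committee:
--         return "Personal Paper"
--     elif has_committee and has_councilmember:
--         return "Mixed"
--     else:
--         return "Unknown"
-- ===== SOURCE B (Python) =====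
-- def _sponsor_label(s, committee_names, councilmember_names):
--     """Classify a single sponsor into one of the four paper labels."""
--     in_committee = s in committee_names
--     in_council = s in councilmember_names
--     if in_committee and in_council:
--         return "Mixed"
--     if in_committee:
--         return "Committee Paper"
--     if in_council:
--         return "Personal Paper"
--     return "Unknown"
--
--
-- def _join(a, b):
--     """Join on the label lattice: Unknown is identity, Mixed absorbing,
--     Committee Paper joined with Personal Paper gives Mixed."""
--     if a == "Mixed" or b == "Mixed":
--         return "Mixed"
--     if a == "Unknown":
--         return b
--     if b == "Unknown":
--         return a
--     if a == b:
--         return a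
--     return "Mixed"
--
--
-- def classify_paper_type(sponsors, committee_names, councilmember_names):
--     """Classify legislation as Committee Paper or Personal Paper."""
--     if not sponsors:
--         return None
--     label = "Unknown"
--     for s in sponsors:
--         label = _join(label, _sponsor_label(s, committee_names, councilmember_names))
--         if label == "Mixed":
--             break
--     return label
-- ===== Notes on version B (the rewrite author's own statement) =====
-- stated objective: alternative
-- what changed: Instead of computing two boolean any()-flags and dispatching them through an if/elif ladder, B classifies each sponsor individually into one of the four result labels and folds the labels together with a join operation on a small lattice (Unknown identity, Mixed absorbing, Committee+Personal=Mixed), so there is no flag pair and no final dispatch step.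
import Mathlib
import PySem

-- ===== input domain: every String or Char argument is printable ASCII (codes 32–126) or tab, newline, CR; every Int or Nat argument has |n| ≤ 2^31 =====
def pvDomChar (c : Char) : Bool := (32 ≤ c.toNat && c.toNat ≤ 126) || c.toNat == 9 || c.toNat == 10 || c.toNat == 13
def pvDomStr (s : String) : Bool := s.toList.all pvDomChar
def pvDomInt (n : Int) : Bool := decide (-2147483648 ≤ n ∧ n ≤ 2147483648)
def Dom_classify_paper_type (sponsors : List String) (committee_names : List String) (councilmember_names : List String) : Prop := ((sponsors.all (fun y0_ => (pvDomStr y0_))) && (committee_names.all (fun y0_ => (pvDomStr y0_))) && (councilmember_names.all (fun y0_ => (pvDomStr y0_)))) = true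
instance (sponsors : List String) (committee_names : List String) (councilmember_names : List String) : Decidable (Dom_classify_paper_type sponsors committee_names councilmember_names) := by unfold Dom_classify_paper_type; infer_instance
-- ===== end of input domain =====

-- B classifies each sponsor into one of the four labels and folds them with a lattice join
-- (Unknown identity, Mixed absorbing, Committee+Personal = Mixed) instead of A's two any()
-- flags and if/elif dispatch (objective: alternative); return value only, nothing mutated.

-- ===== PORT A =====
def classify_paper_type (sponsors : List String) (committee_names : List String) (councilmember_names : List String) : Option String :=
  if sponsors.isEmpty then none
  else
    let has_committee := sponsors.any (fun s => committee_names.contains s)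
    let has_councilmember := sponsors.any (fun s => councilmember_names.contains s)
    if has_committee && !has_councilmember then some "Committee Paper"
    else if has_councilmember && !has_committee then some "Personal Paper"
    else if has_committee && has_councilmember then some "Mixed"
    else some "Unknown"

-- ===== PORT B =====
-- _sponsor_label of Source B
def pvSponsorLabel (s : String) (committee_names : List String) (councilmember_names : List String) : String :=
  let in_committee := committee_names.contains s
  let in_council := councilmember_names.contains s
  if in_committee && in_council then "Mixed"
  else if in_committee then "Committee Paper"
  else if in_council then "Personal Paper"
  else "Unknown"

-- _join of Source B
def pvJoin (a b : String) : String :=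
  if a == "Mixed" || b == "Mixed" then "Mixed"
  else if a == "Unknown" then b
  else if b == "Unknown" then a
  else if a == b then a
  else "Mixed"

-- the loop of Source B with its early break on "Mixed"
def pvAltLoop (committee_names councilmember_names : List String) : List String → String → String
  | [], label => label
  | s :: rest, label =>
    let label' := pvJoin label (pvSponsorLabel s committee_names councilmember_names)
    if label' == "Mixed" then label'
    else pvAltLoop committee_names councilmember_names rest label'

def classify_paper_type_alt (sponsors : List String) (committee_names : List String) (councilmember_names : List String) : Option String :=
  if sponsors.isEmpty then none
  else some (pvAltLoop committee_names councilmember_names sponsors "Unknown")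

-- ===== PRECONDITION & SPEC =====
def Spec_classify_paper_type (sponsors : List String) (committee_names : List String) (councilmember_names : List String) (out : Option String) : Prop := out = classify_paper_type_alt sponsors committee_names councilmember_names
instance (sponsors : List String) (committee_names : List String) (councilmember_names : List String) (out : Option String) : Decidable (Spec_classify_paper_type sponsors committee_names councilmember_names out) := by unfold Spec_classify_paper_type; infer_instance

-- ===== CLAIM (what is proved, stated in full; the proofs are below) =====
def Claim_equal_classify_paper_type : Prop := ∀ (sponsors : List String) (committee_names : List String) (councilmember_names : List String), Dom_classify_paper_type sponsors committee_names councilmember_names → Spec_classify_paper_type sponsors committee_names councilmember_names (classify_paper_type sponsors committee_names councilmember_names)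

-- ===== LEMMAS AND PROOFS =====

-- encoding of A's flag pair as a label
def pvLab (hc hm : Bool) : String :=
  if hc && hm then "Mixed"
  else if hc then "Committee Paper"
  else if hm then "Personal Paper"
  else "Unknown"

-- the label fold computes exactly the label of the pair of A's two any-scans
theorem pvAltLoop_eq (cm cc : List String) (sponsors : List String) (hc hm : Bool) :
    pvAltLoop cm cc sponsors (pvLab hc hm) =
      pvLab (hc || sponsors.any (fun s => cm.contains s))
            (hm || sponsors.any (fun s => cc.contains s)) := by
  induction sponsors generalizing hc hm with
  | nil => simp [pvAltLoop]
  | cons s rest ih =>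
    simp only [pvAltLoop, List.any_cons]
    have hstep : pvJoin (pvLab hc hm) (pvSponsorLabel s cm cc) =
        pvLab (hc || cm.contains s) (hm || cc.contains s) := by
      cases hc <;> cases hm <;> cases h1 : cm.contains s <;> cases h2 : cc.contains s <;>
        simp only [pvJoin, pvSponsorLabel, pvLab, h1, h2] <;> decide
    rw [hstep, ← Bool.or_assoc, ← Bool.or_assoc]
    cases g1 : (hc || cm.contains s) <;> cases g2 : (hm || cc.contains s)
    · rw [show (pvLab false false == "Mixed") = false from by decide]
      simp only [Bool.false_eq_true, if_false]
      exact ih false false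
    · rw [show (pvLab false true == "Mixed") = false from by decide]
      simp only [Bool.false_eq_true, if_false]
      exact ih false true
    · rw [show (pvLab true false == "Mixed") = false from by decide]
      simp only [Bool.false_eq_true, if_false]
      exact ih true false
    · simp [pvLab]

-- ===== VERDICT (by name: the statement is the Claim_ definition above) =====
theorem classify_paper_type_spec : Claim_equal_classify_paper_type := by
  intro sponsors cm cc _
  unfold Spec_classify_paper_type classify_paper_type classify_paper_type_alt
  by_cases he : sponsors.isEmpty
  · simp [he]
  · simp only [he]
    have h0 : ("Unknown" : String) = pvLab false false := by decide
    rw [h0, pvAltLoop_eq]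
    simp only [Bool.false_or]
    cases hC : sponsors.any (fun s => cm.contains s) <;>
      cases hM : sponsors.any (fun s => cc.contains s) <;>
        simp [pvLab]
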